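-- pv_equiv track=rewrite | github.com/jloutey-hash/geovac | debug/eigenchannel_diagnostic.py | build_channel_list
-- ===== SOURCE A (Python) =====
-- from typing import List, Tuple, Dict
--
-- def build_channel_list(l_max: int, homonuclear: bool) -> List[Tuple[int, int]]:
--     """Build (l1, l2) channel list for sigma (m=0) states."""
--     channels = []
--     for l1 in range(l_max + 1):
--         for l2 in range(l_max + 1):
--             if homonuclear and (l1 + l2) % 2 != 0:
--                 continue  # gerade constraint
--             channels.append((l1, l2))
--     channels.sort(key=lambda c: (c[0] + c[1], c[0]))
--     return channels
-- ===== SOURCE B (Python) =====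
-- from typing import List, Tuple
--
-- def build_channel_list(l_max: int, homonuclear: bool) -> List[Tuple[int, int]]:
--     """Build (l1, l2) channel list for sigma (m=0) states, emitted directly in
--     (l1+l2, l1) order: no sort needed."""
--     channels = []
--     for s in range(2 * l_max + 1):
--         if homonuclear and s % 2 != 0:
--             continue
--         channels.extend((l1, s - l1) for l1 in range(max(0, s - l_max), min(s, l_max) + 1))
--     return channels
-- ===== Notes on version B (the rewrite author's own statement) =====
-- stated objective: faster
-- what changed: B emits the (l1,l2) pairs directly in the final (l1+l2, l1) order by iterating over the sum s, so the build-everything-then-sort of A (and its O(n^2 log n) sort) disappears.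
import Mathlib
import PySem

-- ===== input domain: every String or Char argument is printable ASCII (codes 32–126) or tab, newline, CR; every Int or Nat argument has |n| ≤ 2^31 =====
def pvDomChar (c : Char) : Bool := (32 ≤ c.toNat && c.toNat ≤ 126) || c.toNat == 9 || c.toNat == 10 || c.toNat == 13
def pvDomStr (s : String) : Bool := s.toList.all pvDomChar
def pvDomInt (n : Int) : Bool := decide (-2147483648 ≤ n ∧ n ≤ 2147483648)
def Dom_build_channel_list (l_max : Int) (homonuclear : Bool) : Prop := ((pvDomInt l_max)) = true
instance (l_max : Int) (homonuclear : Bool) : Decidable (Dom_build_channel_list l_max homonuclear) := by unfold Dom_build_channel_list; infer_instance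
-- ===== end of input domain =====

-- B generates the pairs directly in (l1+l2, l1) order (outer loop over the sum s),
-- so the O(n^2 log n) sort of A disappears: objective = faster (asymptotic).

-- ===== PORT A =====
def build_channel_list (l_max : Int) (homonuclear : Bool) : List (Int × Int) :=
  let channels : List (Int × Int) :=
    (PySem.List.pyRange 0 (l_max + 1) 1).foldl (fun acc l1 =>
      (PySem.List.pyRange 0 (l_max + 1) 1).foldl (fun acc2 l2 =>
        if homonuclear && (PySem.Int.mod (l1 + l2) 2 != 0) then acc2
        else acc2 ++ [(l1, l2)]) acc) []
  PySem.List.sorted2 channels (fun c => c.1 + c.2) (fun c => c.1) false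

-- ===== PORT B =====
def build_channel_list_alt (l_max : Int) (homonuclear : Bool) : List (Int × Int) :=
  (PySem.List.pyRange 0 (2 * l_max + 1) 1).foldl (fun acc s =>
    if homonuclear && (PySem.Int.mod s 2 != 0) then acc
    else acc ++ (PySem.List.pyRange (max 0 (s - l_max)) (min s l_max + 1) 1).map
          (fun l1 => (l1, s - l1))) []

-- ===== PRECONDITION & SPEC =====
def Spec_build_channel_list (l_max : Int) (homonuclear : Bool) (out : List (Int × Int)) : Prop := out = build_channel_list_alt l_max homonuclear
instance (l_max : Int) (homonuclear : Bool) (out : List (Int × Int)) : Decidable (Spec_build_channel_list l_max homonuclear out) := by unfold Spec_build_channel_list; infer_instance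

-- ===== CLAIM (what is proved, stated in full; the proofs are below) =====
def Claim_equal_build_channel_list : Prop := ∀ (l_max : Int) (homonuclear : Bool), Dom_build_channel_list l_max homonuclear → Spec_build_channel_list l_max homonuclear (build_channel_list l_max homonuclear)

-- ===== LEMMAS AND PROOFS =====

theorem pv_mod2 (a : Int) : PySem.Int.mod a 2 = a % 2 := by
  simp [PySem.Int.mod, Int.fmod_eq_emod]

-- the sort key of A, as a single lexicographically ordered value
def pvKey (c : Int × Int) : Lex (Int × Int) := toLex (c.1 + c.2, c.1)

-- A's tuple-key sort is the single-key sort under pvKey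
theorem pv_sorted2_eq (xs : List (Int × Int)) :
    PySem.List.sorted2 xs (fun c => c.1 + c.2) (fun c => c.1) false
      = PySem.List.sorted xs pvKey false := by
  unfold PySem.List.sorted2 PySem.List.sorted
  simp only [if_neg (by decide : ¬ (false = true))]
  apply PySem.List.foldl_congr_mem
  intro acc x _
  congr 1
  funext a b
  rw [Bool.eq_iff_iff]
  simp only [Bool.or_eq_true, Bool.and_eq_true, Bool.not_eq_true', decide_eq_true_eq,
    decide_eq_false_iff_not, pvKey, Prod.Lex.toLex_lt_toLex]
  omega

def pvBlockA (l_max : Int) (homonuclear : Bool) (l1 : Int) : List (Int × Int) :=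
  ((PySem.List.pyRange 0 (l_max + 1) 1).filter
      (fun l2 => !(homonuclear && (PySem.Int.mod (l1 + l2) 2 != 0)))).map (fun l2 => (l1, l2))

theorem pv_channelsA_eq (l_max : Int) (h : Bool) :
    (PySem.List.pyRange 0 (l_max + 1) 1).foldl (fun acc l1 =>
      (PySem.List.pyRange 0 (l_max + 1) 1).foldl (fun acc2 l2 =>
        if h && (PySem.Int.mod (l1 + l2) 2 != 0) then acc2
        else acc2 ++ [(l1, l2)]) acc) []
      = (PySem.List.pyRange 0 (l_max + 1) 1).flatMap (pvBlockA l_max h) := by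
  have inner : ∀ (l1 : Int) (acc : List (Int × Int)),
      (PySem.List.pyRange 0 (l_max + 1) 1).foldl (fun acc2 l2 =>
        if h && (PySem.Int.mod (l1 + l2) 2 != 0) then acc2
        else acc2 ++ [(l1, l2)]) acc = acc ++ pvBlockA l_max h l1 := by
    intro l1 acc
    rw [PySem.List.foldl_congr_mem _ _
      (fun acc2 l2 => if (!(h && (PySem.Int.mod (l1 + l2) 2 != 0))) then acc2 ++ [(l1, l2)] else acc2) _
      (by intro acc2 x _; cases hh : (h && (PySem.Int.mod (l1 + x) 2 != 0)) <;> simp only [hh, Bool.not_false, Bool.not_true] <;> rfl)]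
    exact PySem.List.foldl_append_if _ _ _ _
  rw [PySem.List.foldl_congr_mem _ _ (fun acc l1 => acc ++ pvBlockA l_max h l1) _
    (by intro acc x hx; exact inner x acc)]
  simpa using PySem.List.foldl_append_eq_flatMap (pvBlockA l_max h) _ []

def pvBlockB (l_max : Int) (homonuclear : Bool) (s : Int) : List (Int × Int) :=
  if homonuclear && (PySem.Int.mod s 2 != 0) then []
  else (PySem.List.pyRange (max 0 (s - l_max)) (min s l_max + 1) 1).map (fun l1 => (l1, s - l1))

theorem pv_altB_eq (l_max : Int) (h : Bool) :
    build_channel_list_alt l_max h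
      = (PySem.List.pyRange 0 (2 * l_max + 1) 1).flatMap (pvBlockB l_max h) := by
  unfold build_channel_list_alt
  rw [PySem.List.foldl_congr_mem _ _ (fun acc s => acc ++ pvBlockB l_max h s) _
    (by intro acc x _; unfold pvBlockB; cases hh : (h && (PySem.Int.mod x 2 != 0)) <;> simp only [hh] <;> simp)]
  simpa using PySem.List.foldl_append_eq_flatMap (pvBlockB l_max h) _ []

-- common membership characterisation
theorem pv_memA (l_max : Int) (h : Bool) (x : Int × Int) :
    x ∈ (PySem.List.pyRange 0 (l_max + 1) 1).flatMap (pvBlockA l_max h)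
      ↔ (0 ≤ x.1 ∧ x.1 ≤ l_max ∧ 0 ≤ x.2 ∧ x.2 ≤ l_max ∧
          (h && (PySem.Int.mod (x.1 + x.2) 2 != 0)) = false) := by
  simp only [List.mem_flatMap, pvBlockA, List.mem_map, List.mem_filter,
    PySem.List.mem_pyRange_one, Bool.not_eq_eq_eq_not, Bool.not_true]
  constructor
  · rintro ⟨l1, hl1, l2, ⟨hl2, hc⟩, rfl⟩
    exact ⟨hl1.1, by omega, hl2.1, by omega, hc⟩
  · rintro ⟨h1, h2, h3, h4, hc⟩
    exact ⟨x.1, ⟨h1, by omega⟩, x.2, ⟨⟨h3, by omega⟩, hc⟩, rfl⟩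

theorem pv_memB (l_max : Int) (h : Bool) (x : Int × Int) :
    x ∈ (PySem.List.pyRange 0 (2 * l_max + 1) 1).flatMap (pvBlockB l_max h)
      ↔ (0 ≤ x.1 ∧ x.1 ≤ l_max ∧ 0 ≤ x.2 ∧ x.2 ≤ l_max ∧
          (h && (PySem.Int.mod (x.1 + x.2) 2 != 0)) = false) := by
  simp only [List.mem_flatMap, PySem.List.mem_pyRange_one]
  constructor
  · rintro ⟨s, hs, hx⟩
    unfold pvBlockB at hx
    split at hx
    · simp at hx
    · rename_i hc
      simp only [List.mem_map, PySem.List.mem_pyRange_one] at hx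
      obtain ⟨l1, hl1, rfl⟩ := hx
      refine ⟨by omega, by omega, by omega, by omega, ?_⟩
      have he : l1 + (s - l1) = s := by ring
      rw [he]
      simpa using hc
  · rintro ⟨h1, h2, h3, h4, hc⟩
    refine ⟨x.1 + x.2, ⟨by omega, by omega⟩, ?_⟩
    unfold pvBlockB
    rw [if_neg (by simp only [pv_mod2] at hc ⊢; simp at hc ⊢; omega)]
    simp only [List.mem_map, PySem.List.mem_pyRange_one]
    exact ⟨x.1, ⟨by omega, by omega⟩, by simp⟩

theorem pv_nodupA (l_max : Int) (h : Bool) :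
    ((PySem.List.pyRange 0 (l_max + 1) 1).flatMap (pvBlockA l_max h)).Nodup := by
  rw [List.nodup_flatMap]
  constructor
  · intro l1 _
    unfold pvBlockA
    exact ((PySem.List.nodup_pyRange_one _ _).filter _).map
      (fun a b hab => by simpa using hab)
  · refine (PySem.List.pairwise_lt_pyRange_one 0 (l_max + 1)).imp ?_
    intro a b hab
    intro x hx hx'
    unfold pvBlockA at hx hx'
    simp only [List.mem_map, List.mem_filter] at hx hx'
    obtain ⟨l2, _, rfl⟩ := hx
    obtain ⟨l2', _, he⟩ := hx'
    have := congrArg Prod.fst he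
    simp at this
    omega

theorem pv_pairwiseB (l_max : Int) (h : Bool) :
    ((PySem.List.pyRange 0 (2 * l_max + 1) 1).flatMap (pvBlockB l_max h)).Pairwise
      (fun a b => pvKey a < pvKey b) := by
  rw [List.pairwise_flatMap]
  constructor
  · intro s _
    unfold pvBlockB
    split
    · exact List.Pairwise.nil
    · rw [List.pairwise_map]
      refine (PySem.List.pairwise_lt_pyRange_one _ _).imp ?_
      intro a b hab
      simp only [pvKey, Prod.Lex.toLex_lt_toLex]
      omega
  · refine (PySem.List.pairwise_lt_pyRange_one 0 (2 * l_max + 1)).imp ?_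
    intro s s' hss x hx y hy
    have hxs : x.1 + x.2 = s := by
      unfold pvBlockB at hx
      split at hx
      · simp at hx
      · simp only [List.mem_map, PySem.List.mem_pyRange_one] at hx
        obtain ⟨l1, _, rfl⟩ := hx; simp
    have hys : y.1 + y.2 = s' := by
      unfold pvBlockB at hy
      split at hy
      · simp at hy
      · simp only [List.mem_map, PySem.List.mem_pyRange_one] at hy
        obtain ⟨l1, _, rfl⟩ := hy; simp
    simp only [pvKey, Prod.Lex.toLex_lt_toLex]
    omega

theorem pv_nodupB (l_max : Int) (h : Bool) :
    ((PySem.List.pyRange 0 (2 * l_max + 1) 1).flatMap (pvBlockB l_max h)).Nodup :=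
  (pv_pairwiseB l_max h).imp (fun hab => fun he => by subst he; exact lt_irrefl _ hab)

-- ===== VERDICT (by name: the statement is the Claim_ definition above) =====
theorem build_channel_list_spec : Claim_equal_build_channel_list := by
  intro l_max h _
  unfold Spec_build_channel_list build_channel_list
  show PySem.List.sorted2 _ _ _ false = _
  rw [pv_channelsA_eq, pv_sorted2_eq, pv_altB_eq]
  apply PySem.List.sorted_eq_of_perm_of_pairwise_lt
  · rw [List.perm_ext_iff_of_nodup (pv_nodupB l_max h) (pv_nodupA l_max h)]
    intro a
    rw [pv_memA, pv_memB]
  · exact pv_pairwiseB l_max h
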